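-- pv_equiv track=rewrite | github.com/solomonsh/Problem-Solving | Recurrsion/encrypted_word.py | encrypted_word
-- ===== SOURCE A (Python) =====
-- def encrypted_word(st):
--     if len(st) <=1:
--         return st
--
--     result = ""
--     middle_index = len(st)//2
--     if len(st)%2 == 0:
--         middle_index-=1
--     result+= st[middle_index] + encrypted_word(st[:middle_index]) + encrypted_word(st[middle_index+1:])
--     return result
-- ===== SOURCE B (Python) =====
-- def encrypted_word(st):
--     if len(st) <= 1:
--         return st
--     out = []
--     stack = [(0, len(st))]
--     while stack:
--         lo, hi = stack.pop()
--         n = hi - lo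
--         if n == 0:
--             continue
--         mid = lo + n // 2 - (1 if n % 2 == 0 else 0)
--         out.append(st[mid])
--         stack.append((mid + 1, hi))
--         stack.append((lo, mid))
--     return "".join(out)
-- ===== Notes on version B (the rewrite author's own statement) =====
-- stated objective: alternative
-- what changed: Replaces A's recursion-with-slicing by an iterative explicit stack of (lo,hi) index ranges over the original string, emitting the middle character of each popped range and pushing the two subranges; no substrings are ever materialised.
import Mathlib
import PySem

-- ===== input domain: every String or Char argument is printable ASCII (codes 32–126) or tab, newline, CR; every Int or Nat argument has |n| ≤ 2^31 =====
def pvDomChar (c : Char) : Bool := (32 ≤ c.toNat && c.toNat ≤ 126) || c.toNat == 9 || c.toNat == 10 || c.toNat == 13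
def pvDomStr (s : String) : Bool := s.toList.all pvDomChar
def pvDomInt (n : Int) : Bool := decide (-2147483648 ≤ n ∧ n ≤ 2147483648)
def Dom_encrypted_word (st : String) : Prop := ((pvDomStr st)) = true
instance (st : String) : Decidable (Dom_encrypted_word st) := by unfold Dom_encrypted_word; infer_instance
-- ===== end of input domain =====

-- B replaces A's slicing recursion by an explicit stack of (lo,hi) index ranges
-- over the original string (alternative decomposition; no substring copies).

-- ===== PORT A =====
-- A's middle-index computation: len//2, minus one when len is even.
def pvMidIdx (n : Nat) : Nat := if n % 2 = 0 then n / 2 - 1 else n / 2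

-- A's recursion, over the character list of st.  st[:mid] / st[mid+1:] are
-- ported as take/drop, exact here because 0 ≤ mid < len(st) in this branch.
-- The extra fuel argument is only a structural-termination guard: with fuel
-- ≥ l.length (as the wrapper passes) the 0-case is never reached.
def encryptedAuxF : Nat → List Char → List Char
  | 0, l => l
  | f + 1, l =>
    if l.length ≤ 1 then l
    else l[pvMidIdx l.length]! ::
      (encryptedAuxF f (l.take (pvMidIdx l.length)) ++ encryptedAuxF f (l.drop (pvMidIdx l.length + 1)))

def encrypted_word (st : String) : String :=
  String.ofList (encryptedAuxF st.toList.length st.toList)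

-- ===== PORT B =====
-- Source B's mid for the range (lo,hi): lo + n//2 - (1 if n even else 0), n = hi-lo.
def pvMid (lo hi : Nat) : Nat := lo + (hi - lo) / 2 - (if (hi - lo) % 2 = 0 then 1 else 0)

-- The stack loop of Source B: pop a range, emit its middle character, push the two
-- subranges (left subrange on top, so it is processed next).  Fuel is only a
-- structural-termination guard: the loop runs at most 2*len+1 iterations.
def ewLoopF (l : List Char) : Nat → List (Nat × Nat) → List Char → List Char
  | 0, _, out => out
  | f + 1, stack, out =>
    match stack with
    | [] => out
    | (lo, hi) :: rest =>
      if hi - lo = 0 then ewLoopF l f rest out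
      else ewLoopF l f ((lo, pvMid lo hi) :: (pvMid lo hi + 1, hi) :: rest) (out ++ [l[pvMid lo hi]!])

def encrypted_word_alt (st : String) : String :=
  if st.toList.length ≤ 1 then st
  else String.ofList (ewLoopF st.toList (2 * st.toList.length + 1) [(0, st.toList.length)] [])

-- ===== PRECONDITION & SPEC =====
def Spec_encrypted_word (st : String) (out : String) : Prop := out = encrypted_word_alt st
instance (st : String) (out : String) : Decidable (Spec_encrypted_word st out) := by unfold Spec_encrypted_word; infer_instance

-- ===== CLAIM (what is proved, stated in full; the proofs are below) =====
def Claim_equal_encrypted_word : Prop := ∀ (st : String), Dom_encrypted_word st → Spec_encrypted_word st (encrypted_word st)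

-- ===== LEMMAS AND PROOFS =====

-- A's result with exactly enough fuel (proof-side abbreviation)
def pvEA (l : List Char) : List Char := encryptedAuxF l.length l

theorem pvMidIdx_lt (n : Nat) (h : 1 ≤ n) : pvMidIdx n < n := by
  simp only [pvMidIdx]; split_ifs <;> omega

theorem pvEA_short (l : List Char) (h : l.length ≤ 1) : pvEA l = l := by
  match l with
  | [] => rfl
  | [c] => rfl
  | a :: b :: t => simp at h

-- fuel irrelevance: any sufficient fuel computes pvEA
theorem eaF_eq (f : Nat) : ∀ l : List Char, l.length ≤ f → encryptedAuxF f l = pvEA l := by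
  induction f using Nat.strong_induction_on with
  | _ f ih =>
    intro l hl
    match f with
    | 0 =>
      have : l = [] := List.eq_nil_of_length_eq_zero (by omega)
      subst this; rfl
    | f + 1 =>
      by_cases h1 : l.length ≤ 1
      · simp only [encryptedAuxF, if_pos h1]
        exact (pvEA_short l h1).symm
      · have h2 : 2 ≤ l.length := by omega
        have hmi : pvMidIdx l.length < l.length := pvMidIdx_lt _ (by omega)
        simp only [encryptedAuxF, if_neg h1]
        rw [ih f (by omega) _ (by simp [List.length_take]; omega),
            ih f (by omega) _ (by simp [List.length_drop]; omega)]
        obtain ⟨m, hm⟩ : ∃ m, l.length = m + 1 := ⟨l.length - 1, by omega⟩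
        conv_rhs => rw [pvEA, hm]
        simp only [encryptedAuxF, if_neg h1]
        rw [ih m (by omega) _ (by simp [List.length_take]; omega),
            ih m (by omega) _ (by simp [List.length_drop]; omega)]

theorem pvEA_step (l : List Char) (h2 : 2 ≤ l.length) :
    pvEA l = l[pvMidIdx l.length]! ::
      (pvEA (l.take (pvMidIdx l.length)) ++ pvEA (l.drop (pvMidIdx l.length + 1))) := by
  have hmi : pvMidIdx l.length < l.length := pvMidIdx_lt _ (by omega)
  obtain ⟨m, hm⟩ : ∃ m, l.length = m + 1 := ⟨l.length - 1, by omega⟩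
  conv_lhs => rw [pvEA, hm]
  simp only [encryptedAuxF, if_neg (by omega : ¬ l.length ≤ 1)]
  rw [eaF_eq m _ (by simp [List.length_take]; omega),
      eaF_eq m _ (by simp [List.length_drop]; omega)]

-- the segment of l described by a range
def pvSeg (l : List Char) (p : Nat × Nat) : List Char := (l.drop p.1).take (p.2 - p.1)

-- loop invariant: the loop appends, to out, A's result on each stacked segment
theorem ewLoopF_eq (l : List Char) (f : Nat) :
    ∀ (stack : List (Nat × Nat)) (out : List Char),
    (∀ p ∈ stack, p.1 ≤ p.2 ∧ p.2 ≤ l.length) →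
    (stack.map (fun p => 2 * (p.2 - p.1))).sum + stack.length ≤ f →
    ewLoopF l f stack out = out ++ (stack.map (fun p => pvEA (pvSeg l p))).flatten := by
  induction f using Nat.strong_induction_on with
  | _ f ih =>
    intro stack out hv hm
    match f, stack with
    | 0, [] => simp [ewLoopF]
    | f + 1, [] => simp [ewLoopF]
    | 0, (lo, hi) :: rest => simp at hm
    | f + 1, (lo, hi) :: rest =>
      simp only [List.map_cons, List.sum_cons, List.length_cons] at hm
      have hp := hv (lo, hi) (by simp)
      simp only at hp
      have hlo : lo ≤ hi := hp.1
      have hhi : hi ≤ l.length := hp.2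
      by_cases hn : hi - lo = 0
      · simp only [ewLoopF, if_pos hn]
        rw [ih f (by omega) rest out (fun p hp' => hv p (List.mem_cons_of_mem _ hp')) (by omega)]
        have hseg : pvSeg l (lo, hi) = [] := by simp [pvSeg, hn]
        simp [hseg, pvEA_short]
      · have hn1 : 1 ≤ hi - lo := by omega
        have hmidlo : lo ≤ pvMid lo hi := by simp only [pvMid]; split_ifs <;> omega
        have hmidhi : pvMid lo hi < hi := by simp only [pvMid]; split_ifs <;> omega
        simp only [ewLoopF, if_neg hn]
        rw [ih f (by omega) _ _ (by
            intro p hp'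
            rcases List.mem_cons.mp hp' with h | h'
            · subst h; exact ⟨hmidlo, by omega⟩
            · rcases List.mem_cons.mp h' with h | h
              · subst h; exact ⟨by omega, hhi⟩
              · exact hv p (List.mem_cons_of_mem _ h))
          (by simp only [List.map_cons, List.sum_cons, List.length_cons]; omega)]
        have hseglen : (pvSeg l (lo, hi)).length = hi - lo := by
          simp [pvSeg]; omega
        have hmi : ∀ k, k < hi - lo → (pvSeg l (lo, hi))[k]! = l[lo + k]! := by
          intro k hk
          have hk2 : lo + k < l.length := by omega
          rw [getElem!_pos (pvSeg l (lo, hi)) k (by rw [hseglen]; omega),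
              getElem!_pos l (lo + k) hk2]
          simp [pvSeg]
        have hmidk : pvMid lo hi = lo + pvMidIdx (hi - lo) := by
          simp only [pvMid, pvMidIdx]; split_ifs <;> omega
        have htake : (pvSeg l (lo, hi)).take (pvMid lo hi - lo) = pvSeg l (lo, pvMid lo hi) := by
          simp only [pvSeg, List.take_take]
          congr 1; omega
        have hdrop : (pvSeg l (lo, hi)).drop (pvMid lo hi - lo + 1) = pvSeg l (pvMid lo hi + 1, hi) := by
          simp only [pvSeg, List.drop_take, List.drop_drop]
          congr 1
          · omega
          · congr 1; omega
        have hA : pvEA (pvSeg l (lo, hi))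
            = l[pvMid lo hi]! ::
                (pvEA (pvSeg l (lo, pvMid lo hi)) ++ pvEA (pvSeg l (pvMid lo hi + 1, hi))) := by
          by_cases h1 : hi - lo = 1
          · -- length-1 segment: A returns it unchanged, the two subranges are empty
            have hmid1 : pvMid lo hi = lo := by simp only [pvMid]; split_ifs <;> omega
            have hempty1 : pvSeg l (lo, pvMid lo hi) = [] := by simp [pvSeg, hmid1]
            have hempty2 : pvSeg l (pvMid lo hi + 1, hi) = [] := by
              simp only [pvSeg]
              have : hi - (pvMid lo hi + 1) = 0 := by omega
              simp [this]
            rw [hempty1, hempty2, pvEA_short _ (by rw [hseglen]; omega)]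
            have hsing : pvSeg l (lo, hi) = [(pvSeg l (lo, hi))[0]!] := by
              rw [getElem!_pos (pvSeg l (lo, hi)) 0 (by rw [hseglen]; omega)]
              apply List.ext_getElem
              · simp [hseglen, h1]
              · intro i h1' h2'
                simp [hseglen, h1] at h1'
                subst h1'; simp
            rw [pvEA_short [] (by simp)]
            rw [hsing, hmi 0 (by omega)]
            simp [hmid1]
          · rw [pvEA_step _ (by rw [hseglen]; omega)]
            simp only [hseglen]
            rw [hmi (pvMidIdx (hi - lo)) (by omega)]
            rw [show lo + pvMidIdx (hi - lo) = pvMid lo hi from hmidk.symm]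
            rw [show pvMidIdx (hi - lo) = pvMid lo hi - lo from by omega]
            rw [htake, hdrop]
        simp [hA]

-- ===== VERDICT (by name: the statement is the Claim_ definition above) =====
theorem encrypted_word_spec : Claim_equal_encrypted_word := by
  intro st _
  unfold Spec_encrypted_word encrypted_word encrypted_word_alt
  by_cases h : st.toList.length ≤ 1
  · rw [if_pos h]
    have := pvEA_short st.toList h
    rw [pvEA] at this
    rw [this, String.ofList_toList]
  · rw [if_neg h]
    rw [ewLoopF_eq st.toList (2 * st.toList.length + 1) [(0, st.toList.length)] []
        (by intro p hp; simp at hp; simp [hp])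
        (by simp)]
    simp only [List.map_cons, List.map_nil, List.flatten_cons, List.flatten_nil,
      List.append_nil, List.nil_append, pvSeg, List.drop_zero, Nat.sub_zero, List.take_length,
      pvEA]
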